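-- pv_equiv track=rewrite | github.com/chrisbroski/cumulative-dice | diceprob.py | __distMaxComb
-- ===== SOURCE A (Python) =====
-- def __distMaxComb(listDice):
--     """
--         Input a list of lists. Output a dict of maximum combinations for each die group.
--         Optimized: It used to just return one value at a time, but now returns all in a dict.
--     """
--
--     maxCombGroup = {}
--     for ii in range(len(listDice)+1):
--         maxCombGroup[ii] = 1
--
--         leftDie = [len(x) for x in listDice[ii:]]
--         for ll in leftDie:
--             maxCombGroup[ii] *= ll
--
--     return maxCombGroup
-- ===== SOURCE B (Python) =====
-- def __distMaxComb(listDice):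
--     """Single right-to-left pass: maintain a running suffix product instead of
--     recomputing the product of the remaining group sizes for every start index."""
--     prods = []
--     prod = 1
--     for group in reversed(listDice):
--         prods.append(prod)
--         prod *= len(group)
--     prods.append(prod)
--     prods.reverse()
--     return dict(enumerate(prods))
-- ===== Notes on version B (the rewrite author's own statement) =====
-- stated objective: faster
-- what changed: Replaces the per-key rescan of the remaining groups (recomputing each suffix product from scratch) by one right-to-left pass that maintains a running suffix product and then builds the dict from the enumerated list.
import Mathlib
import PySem

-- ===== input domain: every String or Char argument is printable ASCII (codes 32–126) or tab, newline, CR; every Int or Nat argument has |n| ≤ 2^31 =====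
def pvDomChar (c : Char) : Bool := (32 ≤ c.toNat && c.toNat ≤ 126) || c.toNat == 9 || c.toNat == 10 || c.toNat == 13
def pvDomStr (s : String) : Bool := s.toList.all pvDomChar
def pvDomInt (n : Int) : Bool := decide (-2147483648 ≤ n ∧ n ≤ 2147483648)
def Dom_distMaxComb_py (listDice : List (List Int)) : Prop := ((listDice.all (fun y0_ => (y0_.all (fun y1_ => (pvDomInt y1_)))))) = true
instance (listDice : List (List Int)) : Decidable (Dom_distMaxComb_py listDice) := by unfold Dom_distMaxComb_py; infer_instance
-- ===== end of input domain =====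

-- B replaces A's quadratic per-key rescan by one right-to-left pass with a running suffix product (objective: faster).

-- ===== PORT A =====
-- for ii in range(len(listDice)+1): maxCombGroup[ii] = 1; for ll in [len(x) for x in listDice[ii:]]: maxCombGroup[ii] *= ll
def distMaxComb_py (listDice : List (List Int)) : List (Int × Int) :=
  ((PySem.List.pyRange 0 ((listDice.length : Int) + 1) 1).foldl
    (fun maxCombGroup ii =>
      let d := maxCombGroup.insert ii (1 : Int)
      let leftDie := (PySem.List.slice listDice (some ii) none).map (fun x => (x.length : Int))
      leftDie.foldl (fun d ll => d.modify ii 1 (· * ll)) d)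
    PySem.Dict.empty).items

-- ===== PORT B =====
-- running suffix product built over reversed(listDice), then reversed and turned into dict(enumerate(prods))
def distMaxComb_py_alt (listDice : List (List Int)) : List (Int × Int) :=
  let s := listDice.reverse.foldl
    (fun (s : List Int × Int) group => (s.1 ++ [s.2], s.2 * (group.length : Int))) ([], 1)
  let prods := (s.1 ++ [s.2]).reverse
  (PySem.Dict.ofList (PySem.List.enumerate prods)).items

-- ===== PRECONDITION & SPEC =====
def Spec_distMaxComb_py (listDice : List (List Int)) (out : List (Int × Int)) : Prop := out = distMaxComb_py_alt listDice
instance (listDice : List (List Int)) (out : List (Int × Int)) : Decidable (Spec_distMaxComb_py listDice out) := by unfold Spec_distMaxComb_py; infer_instance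

-- ===== CLAIM (what is proved, stated in full; the proofs are below) =====
def Claim_equal_distMaxComb_py : Prop := ∀ (listDice : List (List Int)), Dom_distMaxComb_py listDice → Spec_distMaxComb_py listDice (distMaxComb_py listDice)

-- ===== LEMMAS AND PROOFS =====

-- product of the group sizes
def pvLenProd (xs : List (List Int)) : Int := (xs.map (fun x => (x.length : Int))).prod

theorem pvLenProd_nil : pvLenProd [] = 1 := rfl
theorem pvLenProd_cons (x : List Int) (t : List (List Int)) :
    pvLenProd (x :: t) = (x.length : Int) * pvLenProd t := by
  simp [pvLenProd]
theorem pvLenProd_append (u v : List (List Int)) :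
    pvLenProd (u ++ v) = pvLenProd u * pvLenProd v := by
  simp [pvLenProd]
theorem pvLenProd_reverse (xs : List (List Int)) : pvLenProd xs.reverse = pvLenProd xs := by
  simp [pvLenProd]

-- the common specification list
def pvSpecList (xs : List (List Int)) : List (Int × Int) :=
  (List.range (xs.length + 1)).map (fun k : Nat => ((k : Int), pvLenProd (xs.drop k)))

-- ---------- A side ----------

theorem pvA_inner (L : List Int) (d : PySem.Dict Int Int) (k v : Int) :
    L.foldl (fun d ll => d.modify k 1 (· * ll)) (d.insert k v)
      = d.insert k (L.foldl (· * ·) v) := by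
  induction L generalizing v with
  | nil => rfl
  | cons ll L ih =>
      simp only [List.foldl_cons, PySem.Dict.modify, PySem.Dict.getD_insert_self,
        PySem.Dict.insert_insert_self]
      exact ih (v * ll)

theorem pvFoldl_mul_eq_prod (L : List Int) : L.foldl (· * ·) 1 = L.prod :=
  (List.prod_eq_foldl).symm

theorem pvA_outer (listDice : List (List Int)) :
    ∀ (n a : Nat) (d : PySem.Dict Int Int),
      (∀ p ∈ d.items, p.1 < (a : Int)) →
      ((PySem.List.pyRange (a : Int) ((a : Int) + (n : Int)) 1).foldl
        (fun maxCombGroup ii =>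
          let d := maxCombGroup.insert ii (1 : Int)
          let leftDie := (PySem.List.slice listDice (some ii) none).map (fun x => (x.length : Int))
          leftDie.foldl (fun d ll => d.modify ii 1 (· * ll)) d)
        d).items
      = d.items ++ (List.range n).map (fun k => (((a + k : Nat) : Int), pvLenProd (listDice.drop (a + k)))) := by
  intro n
  induction n with
  | zero =>
      intro a d _
      rw [PySem.List.pyRange_one_eq_nil (by omega)]
      simp
  | succ n ih =>
      intro a d hd
      rw [PySem.List.pyRange_one_cons (by push_cast; omega)]
      simp only [List.foldl_cons]
      have hnc : d.contains (a : Int) = false := by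
        by_contra h
        have h' : d.contains (a : Int) = true := by
          cases hc : d.contains (a : Int) <;> simp_all
        have := (PySem.Dict.contains_iff_mem_keys d (a : Int)).mp h'
        simp only [PySem.Dict.keys, List.mem_map] at this
        obtain ⟨p, hp, hfst⟩ := this
        have := hd p hp
        omega
      have hbody :
          (((PySem.List.slice listDice (some ((a : Nat) : Int)) none).map
              (fun x => (x.length : Int))).foldl (fun d ll => d.modify (a : Int) 1 (· * ll))
            (d.insert (a : Int) 1))
          = d.insert (a : Int) (pvLenProd (listDice.drop a)) := by
        rw [pvA_inner, PySem.List.slice_from_natCast, pvFoldl_mul_eq_prod]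
        rfl
      have hca : ((a : Int) + 1) = (((a + 1 : Nat)) : Int) := by push_cast; ring
      have hcb : ((a : Int) + ((n + 1 : Nat) : Int)) = (((a + 1 : Nat) : Int) + (n : Int)) := by
        push_cast; ring
      rw [hbody, hcb, hca,
        ih (a + 1) (d.insert (a : Int) (pvLenProd (listDice.drop a)))
          (by
            intro p hp
            rw [PySem.Dict.items_insert_of_not_contains d _ hnc] at hp
            rcases List.mem_append.mp hp with h | h
            · have := hd p h; push_cast; omega
            · simp only [List.mem_singleton] at h; subst h; push_cast; omega),
        PySem.Dict.items_insert_of_not_contains d _ hnc]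
      rw [List.range_succ_eq_map, List.map_cons, List.map_map]
      have hfun : ((fun k => (((a + k : Nat) : Int), pvLenProd (listDice.drop (a + k)))) ∘ Nat.succ)
          = (fun k => (((a + 1 + k : Nat) : Int), pvLenProd (listDice.drop (a + 1 + k)))) := by
        funext k
        have : a + Nat.succ k = a + 1 + k := by omega
        simp [Function.comp, this]
      rw [hfun]
      simp [List.append_assoc]

theorem pvA_eq (listDice : List (List Int)) : distMaxComb_py listDice = pvSpecList listDice := by
  unfold distMaxComb_py pvSpecList
  have h := pvA_outer listDice (listDice.length + 1) 0 PySem.Dict.empty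
    (by intro p hp; simp [PySem.Dict.empty] at hp)
  simp only [Nat.cast_zero, zero_add, Nat.cast_add, Nat.cast_one] at h ⊢
  rw [h]
  simp [PySem.Dict.empty]

-- ---------- B side ----------

-- the list of partial products appended by B's loop
def pvGp : List (List Int) → Int → List Int
  | [], _ => []
  | x :: t, p => p :: pvGp t (p * (x.length : Int))

theorem pvB_fold (xs : List (List Int)) :
    ∀ (ps : List Int) (p : Int),
      xs.foldl (fun (s : List Int × Int) group => (s.1 ++ [s.2], s.2 * (group.length : Int))) (ps, p)
        = (ps ++ pvGp xs p, p * pvLenProd xs) := by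
  induction xs with
  | nil => intro ps p; simp [pvGp, pvLenProd_nil]
  | cons x t ih =>
      intro ps p
      simp only [List.foldl_cons, ih, pvGp, pvLenProd_cons]
      simp [mul_assoc, List.append_assoc]

theorem pvGp_append (u v : List (List Int)) :
    ∀ p, pvGp (u ++ v) p = pvGp u p ++ pvGp v (p * pvLenProd u) := by
  induction u with
  | nil => intro p; simp [pvGp, pvLenProd_nil]
  | cons x t ih =>
      intro p
      simp only [List.cons_append, pvGp, ih, pvLenProd_cons]
      rw [mul_assoc]

theorem pvB_main (xs : List (List Int)) :
    (pvGp xs.reverse 1 ++ [pvLenProd xs.reverse]).reverse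
      = (List.range (xs.length + 1)).map (fun k => pvLenProd (xs.drop k)) := by
  induction xs with
  | nil => rfl
  | cons y t ih =>
      have h1 : (y :: t).reverse = t.reverse ++ [y] := by simp
      rw [h1, pvGp_append, pvLenProd_append]
      have h2 : pvGp [y] (1 * pvLenProd t.reverse) = [pvLenProd t.reverse] := by
        simp [pvGp]
      rw [h2]
      have h3 : pvLenProd [y] = (y.length : Int) := by simp [pvLenProd]
      rw [h3]
      have hL : pvLenProd t.reverse * (y.length : Int) = pvLenProd (y :: t) := by
        rw [pvLenProd_reverse, pvLenProd_cons, mul_comm]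
      rw [List.append_assoc]
      have h4 : (pvGp t.reverse 1 ++ ([pvLenProd t.reverse] ++ [pvLenProd t.reverse * (y.length : Int)])).reverse
          = pvLenProd t.reverse * (y.length : Int) ::
              (pvGp t.reverse 1 ++ [pvLenProd t.reverse]).reverse := by
        simp
      rw [h4, ih, hL]
      simp only [List.length_cons]
      conv_rhs => rw [List.range_succ_eq_map]
      simp [List.map_map, Function.comp_def]

theorem pvEnum_map_range (m : Nat) (f : Nat → Int) :
    ∀ s : Int, PySem.List.enumerate ((List.range m).map f) s
      = (List.range m).map (fun k : Nat => (s + (k : Int), f k)) := by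
  induction m with
  | zero => intro s; simp [PySem.List.enumerate_nil]
  | succ m ih =>
      intro s
      rw [List.range_succ, List.map_append, PySem.List.enumerate_append, ih,
        List.map_append]
      simp [PySem.List.enumerate_cons, PySem.List.enumerate_nil]

theorem pvOfList_items {l : List (Int × Int)} (h : (l.map (·.1)).Nodup) :
    (PySem.Dict.ofList l).items = l := by
  unfold PySem.Dict.ofList PySem.Dict.update
  have := PySem.Dict.items_foldl_insert_fresh l (·.1) (·.2) PySem.Dict.empty
    (by intro a _; exact PySem.Dict.contains_empty _) h
  simpa [PySem.Dict.empty, PySem.Dict.items] using this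

theorem pvB_eq (listDice : List (List Int)) : distMaxComb_py_alt listDice = pvSpecList listDice := by
  show (PySem.Dict.ofList (PySem.List.enumerate
      (((listDice.reverse.foldl
        (fun (s : List Int × Int) group => (s.1 ++ [s.2], s.2 * (group.length : Int))) ([], 1)).1
        ++ [(listDice.reverse.foldl
        (fun (s : List Int × Int) group => (s.1 ++ [s.2], s.2 * (group.length : Int))) ([], 1)).2]).reverse))).items
    = pvSpecList listDice
  rw [pvB_fold, one_mul, List.nil_append, pvB_main]
  rw [pvEnum_map_range (listDice.length + 1) (fun k => pvLenProd (listDice.drop k)) 0]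
  have h0 : (fun k : Nat => ((0 : Int) + (k : Int), pvLenProd (listDice.drop k)))
      = (fun k : Nat => ((k : Int), pvLenProd (listDice.drop k))) := by
    funext k; simp
  rw [h0, pvOfList_items]
  · rfl
  · simp only [List.map_map]
    have : ((fun p : Int × Int => p.1) ∘ fun k : Nat => ((k : Int), pvLenProd (listDice.drop k)))
        = (fun k : Nat => (k : Int)) := by funext k; rfl
    rw [this]
    exact List.Nodup.map (fun a b h => by exact_mod_cast h) List.nodup_range

-- ===== VERDICT (by name: the statement is the Claim_ definition above) =====
theorem distMaxComb_py_spec : Claim_equal_distMaxComb_py := by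
  intro listDice _
  unfold Spec_distMaxComb_py
  rw [pvA_eq, pvB_eq]
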